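-- pv_equiv track=rewrite | github.com/Carloo1234/Chess | chess_logic.py | rook_valid_moves
-- ===== SOURCE A (Python) =====
-- def findPieceIndex(piece_list, coords):
--     """Finds the index of a piece at given coordinates."""
--     for index, (piece_name, piece_coords) in enumerate(piece_list):
--         if piece_coords == coords:
--             return index
--     return -1
--
-- def filterOutsideBoard(possibleMoves):
--     validMoves = []
--     for move in possibleMoves:
--         if not (move[0] < 1 or move[0] > 8 or move[1] < 1 or move[1] > 8):
--             validMoves.append(move)
--     return validMoves
--
-- def filterOwnPieces(possibleMoves, whitePieces):
--     validMoves = []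
--     for move in possibleMoves:
--         if findPieceIndex(whitePieces, move) == -1:
--             validMoves.append(move)
--     return validMoves
--
-- def rook_valid_moves(piecePos, whitePieces, blackPieces):
--     possibleMoves = []
--     # Up
--     for i in range(1, 9):
--         move = [piecePos[0], piecePos[1] - i]
--         possibleMoves.append(move)
--         if findPieceIndex(blackPieces + whitePieces, move) != -1:
--             break
--     # Down
--     for i in range(1, 9):
--         move = [piecePos[0], piecePos[1] + i]
--         possibleMoves.append(move)
--         if findPieceIndex(blackPieces + whitePieces, move) != -1:
--             break
--     # Right
--     for i in range(1, 9):
--         move = [piecePos[0] + i, piecePos[1]]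
--         possibleMoves.append(move)
--         if findPieceIndex(blackPieces + whitePieces, move) != -1:
--             break
--     # Left
--     for i in range(1, 9):
--         move = [piecePos[0] - i, piecePos[1]]
--         possibleMoves.append(move)
--         if findPieceIndex(blackPieces + whitePieces, move) != -1:
--             break
--     filteredOutsideBoardMoves = filterOutsideBoard(possibleMoves)
--     validMoves = filterOwnPieces(filteredOutsideBoardMoves, whitePieces)
--     return validMoves
-- ===== SOURCE B (Python) =====
-- def rook_valid_moves(piecePos, whitePieces, blackPieces):
--     x, y = piecePos[0], piecePos[1]
--     coords = [c for _, c in blackPieces] + [c for _, c in whitePieces]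
--     white = set()
--     for _, c in whitePieces:
--         if len(c) == 2:
--             white.add((c[0], c[1]))
--
--     def nearest(dx, dy):
--         # min step-distance (1..8) to a piece on this ray; 8 if none within reach
--         best = 8
--         for c in coords:
--             if len(c) != 2:
--                 continue
--             if dx == 0:
--                 if c[0] != x:
--                     continue
--                 d = (c[1] - y) * dy
--             else:
--                 if c[1] != y:
--                     continue
--                 d = (c[0] - x) * dx
--             if 1 <= d < best:
--                 best = d
--         return best
--
--     out = []
--     for dx, dy in ((0, -1), (0, 1), (1, 0), (-1, 0)):
--         m = nearest(dx, dy)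
--         for i in range(1, m + 1):
--             mx, my = x + dx * i, y + dy * i
--             if 1 <= mx <= 8 and 1 <= my <= 8 and (mx, my) not in white:
--                 out.append([mx, my])
--     return out
-- ===== Notes on version B (the rewrite author's own statement) =====
-- stated objective: alternative
-- what changed: A walks the board square by square in each direction with a break at the first piece; B never walks squares: per direction it scans the piece lists once for the nearest blocker's step-distance, emits squares 1..min(blocker,8) directly, and filters with a precomputed set of white-piece coordinates.
import Mathlib
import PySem

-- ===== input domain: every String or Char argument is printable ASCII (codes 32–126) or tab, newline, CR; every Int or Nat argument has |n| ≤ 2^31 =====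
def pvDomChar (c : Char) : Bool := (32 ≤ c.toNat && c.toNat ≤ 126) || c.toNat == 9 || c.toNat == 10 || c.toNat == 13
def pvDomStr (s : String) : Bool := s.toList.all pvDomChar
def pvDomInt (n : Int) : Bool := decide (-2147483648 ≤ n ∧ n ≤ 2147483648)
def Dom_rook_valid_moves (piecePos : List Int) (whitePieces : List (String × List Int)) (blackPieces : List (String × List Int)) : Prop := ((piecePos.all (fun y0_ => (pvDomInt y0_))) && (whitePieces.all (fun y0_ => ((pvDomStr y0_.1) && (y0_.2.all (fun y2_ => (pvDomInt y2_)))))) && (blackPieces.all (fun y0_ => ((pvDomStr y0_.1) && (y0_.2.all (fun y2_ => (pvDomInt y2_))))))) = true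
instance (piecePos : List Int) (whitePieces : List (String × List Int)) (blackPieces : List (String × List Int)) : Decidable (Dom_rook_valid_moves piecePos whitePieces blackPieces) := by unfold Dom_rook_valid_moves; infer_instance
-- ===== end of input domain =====

-- B walks no squares: per direction it scans the piece lists once for the nearest blocker distance
-- and emits the squares up to it; A walks square by square with a break. Return values proved equal.

-- ===== PORT A =====
-- A's findPieceIndex: enumerate loop → index-accumulating recursion
def fpiAux (pieceList : List (String × List Int)) (coords : List Int) (idx : Int) : Int :=
  match pieceList with
  | [] => -1
  | (_, c) :: rest => if c = coords then idx else fpiAux rest coords (idx + 1)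

def findPieceIndex (pieceList : List (String × List Int)) (coords : List Int) : Int :=
  fpiAux pieceList coords 0

-- A's four direction loops are textually identical up to the direction (dx,dy): one helper,
-- fuel = the 8 iterations of range(1, 9), stopping (break) when a piece is hit
def rookDir (bw : List (String × List Int)) (x y dx dy : Int) : Nat → Int → List (List Int)
  | 0, _ => []
  | n + 1, i =>
    let move := [x + dx * i, y + dy * i]
    if findPieceIndex bw move ≠ -1 then [move]
    else move :: rookDir bw x y dx dy n (i + 1)

-- move[0] / move[1]: every move reaching these filters has length 2, so the default is never read
def filterOutsideBoard : List (List Int) → List (List Int)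
  | [] => []
  | move :: rest =>
    if ¬ (PySem.List.pyGetD move 0 0 < 1 ∨ PySem.List.pyGetD move 0 0 > 8 ∨
          PySem.List.pyGetD move 1 0 < 1 ∨ PySem.List.pyGetD move 1 0 > 8) then
      move :: filterOutsideBoard rest
    else filterOutsideBoard rest

def filterOwnPieces (possibleMoves : List (List Int)) (whitePieces : List (String × List Int)) : List (List Int) :=
  match possibleMoves with
  | [] => []
  | move :: rest =>
    if findPieceIndex whitePieces move = -1 then move :: filterOwnPieces rest whitePieces
    else filterOwnPieces rest whitePieces

def rook_valid_moves (piecePos : List Int) (whitePieces : List (String × List Int)) (blackPieces : List (String × List Int)) : List (List Int) :=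
  match PySem.List.pyGet? piecePos 0, PySem.List.pyGet? piecePos 1 with  -- piecePos[0], piecePos[1]
  | some x, some y =>
  let bw := blackPieces ++ whitePieces
  let possibleMoves :=
    rookDir bw x y 0 (-1) 8 1 ++ rookDir bw x y 0 1 8 1 ++ rookDir bw x y 1 0 8 1 ++ rookDir bw x y (-1) 0 8 1
  filterOwnPieces (filterOutsideBoard possibleMoves) whitePieces
  | _, _ => []  -- IndexError in Python: excluded by Pre_

-- ===== PORT B =====
-- Source B's nearest(): one scan over all piece coordinates, keeping the least step-distance 1..8
def nearestAux (x y dx dy best : Int) : List (List Int) → Int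
  | [] => best
  | c :: rest =>
    match c with
    | [c0, c1] =>
      if dx = 0 then
        if c0 ≠ x then nearestAux x y dx dy best rest
        else
          let d := (c1 - y) * dy
          if 1 ≤ d ∧ d < best then nearestAux x y dx dy d rest else nearestAux x y dx dy best rest
      else
        if c1 ≠ y then nearestAux x y dx dy best rest
        else
          let d := (c0 - x) * dx
          if 1 ≤ d ∧ d < best then nearestAux x y dx dy d rest else nearestAux x y dx dy best rest
    | _ => nearestAux x y dx dy best rest

-- Source B's white set of length-2 coordinate tuples
def whiteSet (whitePieces : List (String × List Int)) : PySem.Set (Int × Int) :=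
  whitePieces.foldl
    (fun s pc => match pc.2 with
      | [c0, c1] => PySem.Set.add s (c0, c1)
      | _ => s)
    PySem.Set.empty

-- Source B's emission test: on the board and not on one of our own pieces
def emitCond (white : PySem.Set (Int × Int)) (x y dx dy i : Int) : Bool :=
  (1 ≤ x + dx * i && x + dx * i ≤ 8) && (1 ≤ y + dy * i && y + dy * i ≤ 8) &&
    !(PySem.Set.contains white (x + dx * i, y + dy * i))

def rook_valid_moves_alt (piecePos : List Int) (whitePieces : List (String × List Int)) (blackPieces : List (String × List Int)) : List (List Int) :=
  match PySem.List.pyGet? piecePos 0 with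
  | none => []  -- IndexError in Python: excluded by Pre_
  | some x =>
  match PySem.List.pyGet? piecePos 1 with
  | none => []
  | some y =>
  let coords := blackPieces.map (·.2) ++ whitePieces.map (·.2)
  let white := whiteSet whitePieces
  [((0 : Int), (-1 : Int)), (0, 1), (1, 0), (-1, 0)].foldl
    (fun out dir =>
      (PySem.List.pyRange 1 (nearestAux x y dir.1 dir.2 8 coords + 1)).foldl
        (fun out i =>
          if emitCond white x y dir.1 dir.2 i then out ++ [[x + dir.1 * i, y + dir.2 * i]] else out)
        out)
    []

-- ===== PRECONDITION & SPEC =====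
-- A reads piecePos[0] and piecePos[1]; on shorter lists it raises IndexError, so those are excluded.
def Pre_rook_valid_moves (piecePos : List Int) (_whitePieces : List (String × List Int)) (_blackPieces : List (String × List Int)) : Prop :=
  2 ≤ piecePos.length
instance (piecePos : List Int) (whitePieces : List (String × List Int)) (blackPieces : List (String × List Int)) : Decidable (Pre_rook_valid_moves piecePos whitePieces blackPieces) := by unfold Pre_rook_valid_moves; infer_instance

def pvWitness_rook_valid_moves : List Int × (List (String × List Int)) × (List (String × List Int)) :=
  ([4, 4], [("P", [4, 6])], [("p", [4, 2])])

def Spec_rook_valid_moves (piecePos : List Int) (whitePieces : List (String × List Int)) (blackPieces : List (String × List Int)) (out : List (List Int)) : Prop := out = rook_valid_moves_alt piecePos whitePieces blackPieces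
instance (piecePos : List Int) (whitePieces : List (String × List Int)) (blackPieces : List (String × List Int)) (out : List (List Int)) : Decidable (Spec_rook_valid_moves piecePos whitePieces blackPieces out) := by unfold Spec_rook_valid_moves; infer_instance

-- ===== CLAIM (what is proved, stated in full; the proofs are below) =====
def Claim_equal_rook_valid_moves : Prop := ∀ (piecePos : List Int) (whitePieces : List (String × List Int)) (blackPieces : List (String × List Int)), Dom_rook_valid_moves piecePos whitePieces blackPieces → Pre_rook_valid_moves piecePos whitePieces blackPieces → Spec_rook_valid_moves piecePos whitePieces blackPieces (rook_valid_moves piecePos whitePieces blackPieces)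

-- ===== LEMMAS AND PROOFS =====

lemma fpiAux_eq_neg_one_iff (pl : List (String × List Int)) (c : List Int) :
    ∀ k : Int, 0 ≤ k → (fpiAux pl c k = -1 ↔ ∀ p ∈ pl, p.2 ≠ c) := by
  induction pl with
  | nil => simp [fpiAux]
  | cons hd tl ih =>
    intro k hk
    obtain ⟨nm, cc⟩ := hd
    simp only [fpiAux, List.mem_cons]
    by_cases h : cc = c
    · constructor
      · intro hcon; rw [if_pos h] at hcon; omega
      · intro hall; exact absurd h (by simpa using hall (nm, cc) (Or.inl rfl))
    · rw [if_neg h, ih (k + 1) (by omega)]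
      constructor
      · rintro hall p (rfl | hp)
        · simpa using h
        · exact hall p hp
      · intro hall p hp; exact hall p (Or.inr hp)

lemma findPieceIndex_eq_neg_one_iff (pl : List (String × List Int)) (c : List Int) :
    findPieceIndex pl c = -1 ↔ ∀ p ∈ pl, p.2 ≠ c :=
  fpiAux_eq_neg_one_iff pl c 0 le_rfl

lemma nearest_spec (x y dx dy : Int)
    (hdir : (dx = 0 ∧ dy = -1) ∨ (dx = 0 ∧ dy = 1) ∨ (dy = 0 ∧ dx = 1) ∨ (dy = 0 ∧ dx = -1)) :
    ∀ (coords : List (List Int)) (best : Int), 1 ≤ best →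
      1 ≤ nearestAux x y dx dy best coords ∧
      nearestAux x y dx dy best coords ≤ best ∧
      (nearestAux x y dx dy best coords = best ∨
        ∃ c ∈ coords, c = [x + dx * nearestAux x y dx dy best coords, y + dy * nearestAux x y dx dy best coords]) ∧
      (∀ c ∈ coords, ∀ i : Int, 1 ≤ i → c = [x + dx * i, y + dy * i] → nearestAux x y dx dy best coords ≤ i) := by
  intro coords
  induction coords with
  | nil => intro best hb; simp [nearestAux, hb]
  | cons c rest ih =>
    intro best hb
    match c with
    | [] =>
      have h := ih best hb
      simp only [nearestAux, List.mem_cons]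
      refine ⟨h.1, h.2.1, h.2.2.1.imp id (fun ⟨c', hc', he⟩ => ⟨c', Or.inr hc', he⟩), ?_⟩
      rintro c' (rfl | hc') i hi he
      · simp at he
      · exact h.2.2.2 c' hc' i hi he
    | [c0] =>
      have h := ih best hb
      simp only [nearestAux, List.mem_cons]
      refine ⟨h.1, h.2.1, h.2.2.1.imp id (fun ⟨c', hc', he⟩ => ⟨c', Or.inr hc', he⟩), ?_⟩
      rintro c' (rfl | hc') i hi he
      · simp at he
      · exact h.2.2.2 c' hc' i hi he
    | c0 :: c1 :: c2 :: ct =>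
      have h := ih best hb
      simp only [nearestAux, List.mem_cons]
      refine ⟨h.1, h.2.1, h.2.2.1.imp id (fun ⟨c', hc', he⟩ => ⟨c', Or.inr hc', he⟩), ?_⟩
      rintro c' (rfl | hc') i hi he
      · simp at he
      · exact h.2.2.2 c' hc' i hi he
    | [c0, c1] =>
      -- the only shape the scan looks at; key: [c0,c1] = [x+dx*i, y+dy*i] ∧ 1 ≤ i ↔ the scan's
      -- line test holds and its distance d equals i
      have key : ∀ i : Int, ([c0, c1] = [x + dx * i, y + dy * i] ∧ 1 ≤ i) ↔
          ((if dx = 0 then c0 = x ∧ (c1 - y) * dy = i else c1 = y ∧ (c0 - x) * dx = i) ∧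
            1 ≤ (if dx = 0 then (c1 - y) * dy else (c0 - x) * dx)) := by
        intro i
        rcases hdir with ⟨h1, h2⟩ | ⟨h1, h2⟩ | ⟨h1, h2⟩ | ⟨h1, h2⟩ <;>
          subst h1 <;> subst h2 <;> simp <;> constructor <;> rintro ⟨⟨ha, hb'⟩, hc⟩ <;>
          refine ⟨⟨by omega, by omega⟩, by omega⟩
      have unf : nearestAux x y dx dy best ([c0, c1] :: rest) =
          if (if dx = 0 then c0 = x else c1 = y) ∧
              1 ≤ (if dx = 0 then (c1 - y) * dy else (c0 - x) * dx) ∧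
              (if dx = 0 then (c1 - y) * dy else (c0 - x) * dx) < best then
            nearestAux x y dx dy (if dx = 0 then (c1 - y) * dy else (c0 - x) * dx) rest
          else nearestAux x y dx dy best rest := by
        by_cases hdx : dx = 0 <;> simp only [nearestAux, hdx, if_pos] <;>
          [by_cases hl : c0 = x; by_cases hl : c1 = y] <;> simp [hl]
      set L : Prop := if dx = 0 then c0 = x else c1 = y with hL
      set D : Int := if dx = 0 then (c1 - y) * dy else (c0 - x) * dx with hD
      have key2 : ∀ i : Int, ([c0, c1] = [x + dx * i, y + dy * i] ∧ 1 ≤ i) ↔ (L ∧ D = i ∧ 1 ≤ D) := by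
        intro i
        rw [key i, hL, hD]
        by_cases hdx : dx = 0 <;> simp [hdx] <;> tauto
      rw [unf]
      by_cases hcond : L ∧ 1 ≤ D ∧ D < best
      · rw [if_pos hcond]
        obtain ⟨r1, r2, r3, r4⟩ := ih D hcond.2.1
        refine ⟨r1, by omega, ?_, ?_⟩
        · rcases r3 with hr | ⟨c', hc', he⟩
          · right
            refine ⟨[c0, c1], List.mem_cons_self .., ?_⟩
            have := (key2 (nearestAux x y dx dy D rest)).mpr ⟨hcond.1, by omega, hcond.2.1⟩
            exact this.1
          · exact Or.inr ⟨c', List.mem_cons_of_mem _ hc', he⟩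
        · rintro c' hc' i hi he
          rcases List.mem_cons.mp hc' with rfl | hmem
          · have := (key2 i).mp ⟨he, hi⟩
            omega
          · exact r4 c' hmem i hi he
      · rw [if_neg hcond]
        obtain ⟨r1, r2, r3, r4⟩ := ih best hb
        refine ⟨r1, r2, ?_, ?_⟩
        · exact r3.imp id (fun ⟨c', hc', he⟩ => ⟨c', List.mem_cons_of_mem _ hc', he⟩)
        · rintro c' hc' i hi he
          rcases List.mem_cons.mp hc' with rfl | hmem
          · have hk := (key2 i).mp ⟨he, hi⟩
            have : ¬ D < best := fun hlt => hcond ⟨hk.1, hk.2.2, hlt⟩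
            omega
          · exact r4 c' hmem i hi he

lemma rookDir_succ (bw : List (String × List Int)) (x y dx dy : Int) (n : Nat) (i : Int) :
    rookDir bw x y dx dy (n + 1) i =
      if findPieceIndex bw [x + dx * i, y + dy * i] ≠ -1 then [[x + dx * i, y + dy * i]]
      else [x + dx * i, y + dy * i] :: rookDir bw x y dx dy n (i + 1) := rfl

lemma rookDir_eq (bw : List (String × List Int)) (x y dx dy : Int) :
    ∀ (n : Nat) (i m : Int), i ≤ m → m ≤ i + n →
      (∀ j : Int, i ≤ j → j < m → ∀ p ∈ bw, p.2 ≠ [x + dx * j, y + dy * j]) →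
      ((∃ p ∈ bw, p.2 = [x + dx * m, y + dy * m]) ∨ m = i + n) →
      rookDir bw x y dx dy (n + 1) i = (PySem.List.pyRange i (m + 1)).map (fun j => [x + dx * j, y + dy * j]) := by
  intro n
  induction n with
  | zero =>
    intro i m h1 h2 _ _
    have : m = i := by omega
    subst this
    rw [PySem.List.pyRange_one_singleton]
    rw [rookDir_succ]
    simp only [rookDir, List.map_cons, List.map_nil]
    split <;> rfl
  | succ n ih =>
    intro i m h1 h2 h3 h4
    by_cases hi : i = m
    · subst hi
      have hblk : findPieceIndex bw [x + dx * i, y + dy * i] ≠ -1 := by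
        intro h
        rw [findPieceIndex_eq_neg_one_iff] at h
        rcases h4 with ⟨p, hp, he⟩ | he
        · exact h p hp he
        · omega
      rw [rookDir_succ, if_pos hblk, PySem.List.pyRange_one_singleton]
      rfl
    · have him : i < m := by omega
      have hfree : findPieceIndex bw [x + dx * i, y + dy * i] = -1 := by
        rw [findPieceIndex_eq_neg_one_iff]
        exact h3 i le_rfl him
      rw [rookDir_succ, if_neg (by simp [hfree])]
      rw [ih (i + 1) m (by omega) (by omega)
            (fun j hj1 hj2 => h3 j (by omega) hj2)
            (h4.imp (fun h => h) (fun h => by push_cast at h ⊢; omega))]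
      rw [PySem.List.pyRange_one_cons (by omega : i < m + 1)]
      rfl

lemma fOB_eq (l : List (List Int)) :
    filterOutsideBoard l = l.filter (fun mv => decide (¬ (PySem.List.pyGetD mv 0 0 < 1 ∨ PySem.List.pyGetD mv 0 0 > 8 ∨
      PySem.List.pyGetD mv 1 0 < 1 ∨ PySem.List.pyGetD mv 1 0 > 8))) := by
  induction l with
  | nil => rfl
  | cons mv rest ih => simp only [filterOutsideBoard, List.filter_cons, ih]; split_ifs <;> simp_all

lemma fOP_eq (l : List (List Int)) (w : List (String × List Int)) :
    filterOwnPieces l w = l.filter (fun mv => decide (findPieceIndex w mv = -1)) := by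
  induction l with
  | nil => rfl
  | cons mv rest ih => simp only [filterOwnPieces, List.filter_cons, ih]; split_ifs <;> simp_all

lemma mem_whiteFold (w : List (String × List Int)) (z : Int × Int) :
    ∀ s : PySem.Set (Int × Int),
      (z ∈ w.foldl (fun s pc => match pc.2 with
        | [c0, c1] => PySem.Set.add s (c0, c1)
        | _ => s) s) ↔ z ∈ s ∨ ∃ p ∈ w, p.2 = [z.1, z.2] := by
  induction w with
  | nil => simp
  | cons hd tl ih =>
    intro s
    simp only [List.foldl_cons, List.mem_cons, ih]
    rcases hd with ⟨nm, cc⟩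
    match cc with
    | [] => simp
    | [c0] => simp
    | [c0, c1] =>
      simp only [PySem.Set.mem_add]
      constructor
      · rintro ((hs | rfl) | htl)
        · exact Or.inl hs
        · exact Or.inr ⟨(nm, [c0, c1]), Or.inl rfl, rfl⟩
        · exact Or.inr (htl.imp (fun p hp => ⟨Or.inr hp.1, hp.2⟩))
      · rintro (hs | ⟨p, (rfl | hp), h2⟩)
        · exact Or.inl (Or.inl hs)
        · simp only [List.cons.injEq] at h2
          left; right; ext <;> simp [h2.1, h2.2.1]
        · exact Or.inr ⟨p, hp, h2⟩
    | c0 :: c1 :: c2 :: ct =>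
      constructor
      · rintro (hs | htl)
        · exact Or.inl hs
        · exact Or.inr (htl.imp (fun p hp => ⟨Or.inr hp.1, hp.2⟩))
      · rintro (hs | ⟨p, (rfl | hp), h2⟩)
        · exact Or.inl hs
        · simp at h2
        · exact Or.inr ⟨p, hp, h2⟩

lemma mem_whiteSet (w : List (String × List Int)) (a b : Int) :
    (a, b) ∈ whiteSet w ↔ ∃ p ∈ w, p.2 = [a, b] := by
  simpa [whiteSet, PySem.Set.empty] using mem_whiteFold w (a, b) PySem.Set.empty

lemma dir_eq (w b : List (String × List Int)) (x y dx dy : Int)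
    (hdir : (dx = 0 ∧ dy = -1) ∨ (dx = 0 ∧ dy = 1) ∨ (dy = 0 ∧ dx = 1) ∨ (dy = 0 ∧ dx = -1))
    (acc : List (List Int)) :
    (PySem.List.pyRange 1 (nearestAux x y dx dy 8 (b.map (·.2) ++ w.map (·.2)) + 1)).foldl
      (fun out i => if emitCond (whiteSet w) x y dx dy i then out ++ [[x + dx * i, y + dy * i]] else out) acc
    = acc ++ filterOwnPieces (filterOutsideBoard (rookDir (b ++ w) x y dx dy 8 1)) w := by
  obtain ⟨h1, h8, hblk, hmin⟩ := nearest_spec x y dx dy hdir (b.map (·.2) ++ w.map (·.2)) 8 (by norm_num)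
  set m := nearestAux x y dx dy 8 (b.map (·.2) ++ w.map (·.2)) with hm
  have hc2 : b.map (·.2) ++ w.map (·.2) = (b ++ w).map (fun p : String × List Int => p.2) :=
    (List.map_append ..).symm
  have hrd : rookDir (b ++ w) x y dx dy 8 1
      = (PySem.List.pyRange 1 (m + 1)).map (fun j => [x + dx * j, y + dy * j]) := by
    have h := rookDir_eq (b ++ w) x y dx dy 7 1 m h1 (by push_cast; omega)
      (fun j hj1 hj2 p hp he => absurd (hmin p.2 (by rw [hc2]; exact List.mem_map_of_mem hp) j hj1 he) (by omega))
      (by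
        rcases hblk with hm8 | ⟨c, hc, he⟩
        · right; push_cast; omega
        · left
          rw [hc2] at hc
          obtain ⟨p, hp, rfl⟩ := List.mem_map.mp hc
          exact ⟨p, hp, he⟩)
    rwa [show (7 : Nat) + 1 = 8 from rfl] at h
  rw [hrd, PySem.List.foldl_append_if (emitCond (whiteSet w) x y dx dy) (fun j => [x + dx * j, y + dy * j]),
      fOB_eq, fOP_eq, List.filter_filter, List.filter_map]
  refine congrArg (acc ++ ·) (congrArg _ (List.filter_congr ?_))
  intro j _
  apply Bool.eq_iff_iff.mpr
  simp only [emitCond, Function.comp_apply, Bool.and_eq_true, decide_eq_true_eq, Bool.not_eq_true',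
    PySem.List.pyGetD_zero_cons]
  have hget1 : PySem.List.pyGetD [x + dx * j, y + dy * j] 1 0 = y + dy * j := by
    simp [PySem.List.pyGetD]
  rw [hget1]
  have hcont : PySem.Set.contains (whiteSet w) (x + dx * j, y + dy * j) = false ↔
      findPieceIndex w [x + dx * j, y + dy * j] = -1 := by
    rw [findPieceIndex_eq_neg_one_iff]
    simp only [PySem.Set.contains, List.contains_eq_mem, decide_eq_false_iff_not, mem_whiteSet]
    constructor
    · intro h p hp he; exact h ⟨p, hp, he⟩
    · rintro h ⟨p, hp, he⟩; exact h p hp he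
  rw [hcont]
  constructor
  · rintro ⟨⟨⟨ha, hb'⟩, hc', hd'⟩, he⟩
    exact ⟨he, by omega⟩
  · rintro ⟨he, hrest⟩
    exact ⟨⟨⟨by omega, by omega⟩, by omega, by omega⟩, he⟩

-- ===== VERDICT (by name: the statement is the Claim_ definition above) =====
theorem rook_valid_moves_spec : Claim_equal_rook_valid_moves := by
  intro piecePos w b _ hpre
  unfold Spec_rook_valid_moves rook_valid_moves rook_valid_moves_alt
  unfold Pre_rook_valid_moves at hpre
  obtain ⟨p0, p1, rest, rfl⟩ : ∃ a c l, piecePos = a :: c :: l := by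
    rcases piecePos with _ | ⟨a, _ | ⟨c, l⟩⟩ <;> simp at hpre ⊢
  have h0 : PySem.List.pyGet? (p0 :: p1 :: rest) 0 = some p0 := by simp [pysem]
  have h1 : PySem.List.pyGet? (p0 :: p1 :: rest) 1 = some p1 := by simp [pysem]
  rw [h0, h1]
  simp only [List.foldl_cons, List.foldl_nil]
  rw [dir_eq w b _ _ 0 (-1) (by tauto), dir_eq w b _ _ 0 1 (by tauto),
      dir_eq w b _ _ 1 0 (by tauto), dir_eq w b _ _ (-1) 0 (by tauto)]
  simp [fOB_eq, fOP_eq, List.filter_append, List.append_assoc]
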